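-- pv_equiv track=rewrite | github.com/matiasandov/facebookABCS2021 | recursion/balanceBrackets.py | check
-- ===== SOURCE A (Python) =====
-- def check(original, reversed, iter):
--     posO = -1
--     posC = -2
--     #posiciones correspondientes a cada tipo de bracket
--     open_list = ["[","{","("]
--     close_list = ["]","}",")"]
--
--     for i in range(0, len(open_list)):
--         #si encuentra
--          if (original[iter] == open_list[i]):
--              posO = i
--
--     for i in range(0, len(close_list)):
--          if (reversed[iter] == close_list[i]):
--              posC = i
--
--     #si la posicion de open_list y close_list es diferente, no corresponde el bracket
--     if((posC != posO) or (len(original) != len(reversed)) ):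
--             return "NO"
--
--     #si ya llegaste al final y nunca se devolvio un no y la pos es la misma
--     elif( iter == (len(original)-1) and (posO == posC) ):
--         return "YES"
--
--     else:
--         return check(original, reversed, iter+1)
-- ===== SOURCE B (Python) =====
-- def check(original, reversed, iter):
--     pairs = {"[": "]", "{": "}", "(": ")"}
--     # position iter must hold a matching bracket pair, and the lengths must agree
--     if pairs.get(original[iter]) != reversed[iter] or len(original) != len(reversed):
--         return "NO"
--     # scan the remaining positions
--     for j in range(iter + 1, len(original)):
--         if pairs.get(original[j]) != reversed[j]:
--             return "NO"
--     return "YES"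
-- ===== Notes on version B (the rewrite author's own statement) =====
-- stated objective: simpler
-- what changed: Replaces A's tail recursion (which re-checks the lengths every call and linearly searches two 3-element bracket lists per character) by a pairing-dict check of position iter, one length check, and a single iterative for-loop over the remaining positions with early exit.
import Mathlib
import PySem

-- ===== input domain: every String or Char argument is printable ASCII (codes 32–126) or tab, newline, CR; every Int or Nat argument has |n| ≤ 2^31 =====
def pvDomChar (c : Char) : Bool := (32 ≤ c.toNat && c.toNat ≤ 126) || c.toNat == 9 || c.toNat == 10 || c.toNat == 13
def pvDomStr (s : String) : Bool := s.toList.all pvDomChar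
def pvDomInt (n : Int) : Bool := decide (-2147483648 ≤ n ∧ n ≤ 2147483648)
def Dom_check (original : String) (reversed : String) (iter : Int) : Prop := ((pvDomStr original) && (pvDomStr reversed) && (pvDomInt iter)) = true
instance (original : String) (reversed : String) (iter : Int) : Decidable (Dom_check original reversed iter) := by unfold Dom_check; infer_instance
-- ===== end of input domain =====

-- B replaces A's tail recursion (with per-call index searches over two bracket lists) by one
-- pairing-dict check of position iter, a length check, and a single forward for-loop over the
-- remaining positions; objective: simpler.

-- ===== PORT A =====
def openListA : List Char := ['[', '{', '(']
def closeListA : List Char := [']', '}', ')']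

-- A's first for-loop: the last i in range(3) with original[iter] == open_list[i], else -1
def posOA (co : Char) : Int :=
  (PySem.List.pyRange 0 (PySem.List.len openListA) 1).foldl
    (fun p i => if PySem.List.pyGet? openListA i = some co then i else p) (-1)
-- A's second for-loop: the last i in range(3) with reversed[iter] == close_list[i], else -2
def posCA (cr : Char) : Int :=
  (PySem.List.pyRange 0 (PySem.List.len closeListA) 1).foldl
    (fun p i => if PySem.List.pyGet? closeListA i = some cr then i else p) (-2)

-- literal transliteration of A's recursion, on the character lists of the two strings
def checkA (o : List Char) (r : List Char) (iter : Int) : String :=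
  match h1 : PySem.List.pyGet? o iter with
  | none => ""   -- IndexError on original[iter]; excluded by Pre_check
  | some co =>
    match PySem.List.pyGet? r iter with
    | none => ""  -- IndexError on reversed[iter]; excluded by Pre_check
    | some cr =>
      let posO : Int := posOA co
      let posC : Int := posCA cr
      if posC ≠ posO ∨ o.length ≠ r.length then "NO"
      else if iter = (o.length : Int) - 1 ∧ posO = posC then "YES"
      else checkA o r (iter + 1)
termination_by ((o.length : Int) - iter).toNat
decreasing_by
  have hin : PySem.Raise.InRange o.length iter := by
    by_contra hc
    rw [← PySem.List.pyGet?_eq_none_iff (xs := o) (i := iter)] at hc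
    simp [hc] at h1
  simp [PySem.Raise.InRange] at hin
  omega

def check (original : String) (reversed : String) (iter : Int) : String :=
  checkA original.toList reversed.toList iter

-- ===== PORT B =====
def pairsB : PySem.Dict Char Char := PySem.Dict.ofList [('[', ']'), ('{', '}'), ('(', ')')]

-- B's for-loop over range(iter + 1, len(original)), with early "NO" exit
def checkLoopB (o : List Char) (r : List Char) : List Int → String
  | [] => "YES"
  | j :: rest =>
    match PySem.List.pyGet? o j with
    | none => ""   -- IndexError on original[j]; excluded by Pre_check
    | some oc =>
      match PySem.List.pyGet? r j with
      | none => ""   -- IndexError on reversed[j]; excluded by Pre_check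
      | some rc =>
        if ¬ (pairsB.get? oc = some rc) then "NO" else checkLoopB o r rest

-- B's body: check position iter, then the lengths, then scan the rest
def checkStartB (o : List Char) (r : List Char) (iter : Int) : String :=
  match PySem.List.pyGet? o iter with
  | none => ""   -- IndexError on original[iter]; excluded by Pre_check
  | some oc =>
    match PySem.List.pyGet? r iter with
    | none => ""   -- IndexError on reversed[iter]; excluded by Pre_check
    | some rc =>
      if ¬ (pairsB.get? oc = some rc) ∨ o.length ≠ r.length then "NO"
      else checkLoopB o r (PySem.List.pyRange (iter + 1) o.length 1)

def check_alt (original : String) (reversed : String) (iter : Int) : String :=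
  checkStartB original.toList reversed.toList iter

-- ===== PRECONDITION & SPEC =====
-- Pre_check: exactly the inputs on which A returns — iter must be a valid Python index into both
-- strings (A indexes original[iter] and reversed[iter] before any length check; every later
-- recursive index is then automatically valid).
def Pre_check (original : String) (reversed : String) (iter : Int) : Prop :=
  PySem.Raise.InRange original.toList.length iter ∧ PySem.Raise.InRange reversed.toList.length iter
instance (original : String) (reversed : String) (iter : Int) : Decidable (Pre_check original reversed iter) := by unfold Pre_check; infer_instance
def pvWitness_check : String × String × Int := ("((", "))", 0)

def Spec_check (original : String) (reversed : String) (iter : Int) (out : String) : Prop := out = check_alt original reversed iter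
instance (original : String) (reversed : String) (iter : Int) (out : String) : Decidable (Spec_check original reversed iter out) := by unfold Spec_check; infer_instance

-- ===== CLAIM (what is proved, stated in full; the proofs are below) =====
def Claim_equal_check : Prop := ∀ (original : String) (reversed : String) (iter : Int), Dom_check original reversed iter → Pre_check original reversed iter → Spec_check original reversed iter (check original reversed iter)

-- ===== LEMMAS AND PROOFS =====

-- get? of B's pairing dict is none off the three open brackets
lemma getnone (oc : Char) (h1 : oc ≠ '[') (h2 : oc ≠ '{') (h3 : oc ≠ '(') :
    pairsB.get? oc = none := by
  have epairs : pairsB = ⟨[('[', ']'), ('{', '}'), ('(', ')')]⟩ := by decide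
  rw [epairs]
  have b1 : ('[' == oc) = false := beq_eq_false_iff_ne.mpr (Ne.symm h1)
  have b2 : ('{' == oc) = false := beq_eq_false_iff_ne.mpr (Ne.symm h2)
  have b3 : ('(' == oc) = false := beq_eq_false_iff_ne.mpr (Ne.symm h3)
  simp [PySem.Dict.get?, List.find?, b1, b2, b3]

-- closed form of A's first index-search fold
lemma posOA_eq (co : Char) : posOA co =
    if co = '(' then 2 else if co = '{' then 1 else if co = '[' then 0 else -1 := by
  have eo : PySem.List.pyRange 0 (PySem.List.len openListA) 1 = [0, 1, 2] := by decide
  have g0 : PySem.List.pyGet? openListA 0 = some '[' := by decide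
  have g1 : PySem.List.pyGet? openListA 1 = some '{' := by decide
  have g2 : PySem.List.pyGet? openListA 2 = some '(' := by decide
  rw [posOA, eo]
  simp only [List.foldl, g0, g1, g2, Option.some_inj]
  by_cases h1 : co = '[' <;> by_cases h2 : co = '{' <;> by_cases h3 : co = '(' <;>
    simp_all [eq_comm]

-- closed form of A's second index-search fold
lemma posCA_eq (cr : Char) : posCA cr =
    if cr = ')' then 2 else if cr = '}' then 1 else if cr = ']' then 0 else -2 := by
  have ec : PySem.List.pyRange 0 (PySem.List.len closeListA) 1 = [0, 1, 2] := by decide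
  have k0 : PySem.List.pyGet? closeListA 0 = some ']' := by decide
  have k1 : PySem.List.pyGet? closeListA 1 = some '}' := by decide
  have k2 : PySem.List.pyGet? closeListA 2 = some ')' := by decide
  rw [posCA, ec]
  simp only [List.foldl, k0, k1, k2, Option.some_inj]
  by_cases h1 : cr = ']' <;> by_cases h2 : cr = '}' <;> by_cases h3 : cr = ')' <;>
    simp_all [eq_comm]

-- A's two index-search folds agree exactly when the pairing dict maps co to cr
lemma charStep (co cr : Char) : posCA cr = posOA co ↔ pairsB.get? co = some cr := by
  have ga : pairsB.get? '[' = some ']' := by decide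
  have gb : pairsB.get? '{' = some '}' := by decide
  have gc : pairsB.get? '(' = some ')' := by decide
  rw [posOA_eq, posCA_eq]
  by_cases h1 : co = '[' <;> by_cases h2 : co = '{' <;> by_cases h3 : co = '(' <;>
    by_cases j1 : cr = ']' <;> by_cases j2 : cr = '}' <;> by_cases j3 : cr = ')' <;>
    (try subst_vars) <;> (try simp_all [getnone, ga, gb, gc]) <;> (try rfl) <;>
    (try decide) <;> (try omega) <;> (try exact fun h => j1 h.symm) <;>
    (try exact fun h => j2 h.symm) <;> (try exact fun h => j3 h.symm)

-- one unfolding of A's recursion when both indexings succeed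
lemma stepA (o r : List Char) (iter : Int) (co cr : Char)
    (h1 : PySem.List.pyGet? o iter = some co) (h2 : PySem.List.pyGet? r iter = some cr) :
    checkA o r iter =
      if pairsB.get? co = some cr ∧ o.length = r.length then
        (if iter = (o.length : Int) - 1 then "YES" else checkA o r (iter + 1))
      else "NO" := by
  have hch := charStep co cr
  rw [checkA, h1, h2]
  dsimp only
  by_cases hpos : posCA cr = posOA co
  · by_cases hlen : o.length = r.length
    · have c1 : ¬(posCA cr ≠ posOA co ∨ o.length ≠ r.length) := by
        rintro (h | h) <;> [exact h hpos; exact h hlen]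
      by_cases hi : iter = (o.length : Int) - 1
      · rw [if_neg c1, if_pos ⟨hi, hpos.symm⟩, if_pos ⟨hch.mp hpos, hlen⟩, if_pos hi]
      · rw [if_neg c1, if_neg (fun h => hi h.1), if_pos ⟨hch.mp hpos, hlen⟩, if_neg hi]
    · rw [if_pos (Or.inr hlen), if_neg (fun h => hlen h.2)]
  · rw [if_pos (Or.inl hpos), if_neg (fun h => hpos (hch.mpr h.1))]

-- one unfolding of B's loop when both indexings succeed
lemma stepB (o r : List Char) (j : Int) (rest : List Int) (co cr : Char)
    (h1 : PySem.List.pyGet? o j = some co) (h2 : PySem.List.pyGet? r j = some cr) :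
    checkLoopB o r (j :: rest) =
      if pairsB.get? co = some cr then checkLoopB o r rest else "NO" := by
  rw [checkLoopB]
  simp only [h1, h2]
  by_cases hg : pairsB.get? co = some cr <;> simp [hg]

lemma pyGet?_some_of_inRange {o : List Char} {i : Int} (h : PySem.Raise.InRange o.length i) :
    ∃ c, PySem.List.pyGet? o i = some c := by
  cases hc : PySem.List.pyGet? o i with
  | none => rw [PySem.List.pyGet?_eq_none_iff] at hc; exact absurd h hc
  | some c => exact ⟨c, rfl⟩

-- on equal lengths, A's recursion from iter computes B's scan of range(iter, len)
lemma loop_eq (o r : List Char) (hlen : o.length = r.length) :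
    ∀ (k : Nat) (iter : Int), (((o.length : Int) - iter).toNat = k) →
      PySem.Raise.InRange o.length iter →
      checkA o r iter = checkLoopB o r (PySem.List.pyRange iter o.length 1) := by
  intro k
  induction k using Nat.strong_induction_on with
  | _ k ih =>
    intro iter hk hin
    have hin' : PySem.Raise.InRange r.length iter := by rwa [← hlen]
    obtain ⟨hlo, hhi⟩ := hin
    obtain ⟨co, h1⟩ := pyGet?_some_of_inRange ⟨hlo, hhi⟩
    obtain ⟨cr, h2⟩ := pyGet?_some_of_inRange hin'
    rw [stepA o r iter co cr h1 h2, PySem.List.pyRange_one_cons hhi,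
        stepB o r iter _ co cr h1 h2]
    by_cases hg : pairsB.get? co = some cr
    · rw [if_pos ⟨hg, hlen⟩, if_pos hg]
      by_cases hi : iter = (o.length : Int) - 1
      · rw [if_pos hi, PySem.List.pyRange_one_eq_nil (by omega), checkLoopB]
      · rw [if_neg hi]
        exact ih (((o.length : Int) - (iter + 1)).toNat) (by omega) (iter + 1) rfl
          ⟨by omega, by omega⟩
    · rw [if_neg (fun h => hg h.1), if_neg hg]

-- B's body equals its loop run from position iter itself (equal lengths, valid iter)
lemma startEq (o r : List Char) (iter : Int) (hlen : o.length = r.length)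
    (hin : PySem.Raise.InRange o.length iter) :
    checkStartB o r iter = checkLoopB o r (PySem.List.pyRange iter o.length 1) := by
  obtain ⟨hlo, hhi⟩ := hin
  obtain ⟨co, h1⟩ := pyGet?_some_of_inRange ⟨hlo, hhi⟩
  obtain ⟨cr, h2⟩ := pyGet?_some_of_inRange (show PySem.Raise.InRange r.length iter by rw [← hlen]; exact ⟨hlo, hhi⟩)
  rw [checkStartB]
  simp only [h1, h2]
  rw [PySem.List.pyRange_one_cons hhi, stepB o r iter _ co cr h1 h2]
  by_cases hg : pairsB.get? co = some cr
  · rw [if_neg (by rintro (h | h) <;> [exact h hg; exact h hlen]), if_pos hg]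
  · rw [if_pos (Or.inl hg), if_neg hg]

-- ===== VERDICT (by name: the statement is the Claim_ definition above) =====
theorem check_spec : Claim_equal_check := by
  intro original reversed iter _ hpre
  unfold Spec_check check check_alt
  obtain ⟨hpo, hpr⟩ := hpre
  obtain ⟨co, h1⟩ := pyGet?_some_of_inRange hpo
  obtain ⟨cr, h2⟩ := pyGet?_some_of_inRange hpr
  by_cases hlen : original.toList.length = reversed.toList.length
  · rw [startEq _ _ iter hlen hpo]
    exact loop_eq _ _ hlen (((original.toList.length : Int) - iter).toNat) iter rfl hpo
  · rw [stepA _ _ iter co cr h1 h2, if_neg (fun h => hlen h.2), checkStartB]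
    simp only [h1, h2]
    rw [if_pos (Or.inr hlen)]
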